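-- pv_equiv track=rewrite | github.com/tuwid-Ashish/python-basics | codevita/vita3b.py | max_worth_alternating
-- ===== SOURCE A (Python) =====
-- def max_worth_alternating(binary_string, worths):
--     n = len(binary_string)
--     stack = []
--     removed_worth = 0
--
--     for i in range(n):
--         current_char = binary_string[i]
--         current_worth = worths[i]
--
--         if not stack:
--             stack.append((current_char, current_worth))
--         else:
--             top_char, top_worth = stack[-1]
--             if top_char != current_char:
--                 stack.append((current_char, current_worth))
--             else:
--                 if current_worth > top_worth:
--                     removed_worth += top_worth
--                     stack.pop()
--                     stack.append((current_char, current_worth))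
--                 else:
--                     removed_worth += current_worth
--
--     total_worth_stack = sum(w for _, w in stack)
--     total_worth_input = sum(worths)
--
--     removed_worth = total_worth_input - total_worth_stack
--     return removed_worth
-- ===== SOURCE B (Python) =====
-- def max_worth_alternating(binary_string, worths):
--     # peel off maximal runs of equal characters; keep each run's max worth
--     pairs = list(zip(binary_string, worths))
--     kept = 0
--     i = 0
--     while i < len(pairs):
--         j = i + 1
--         while j < len(pairs) and pairs[j][0] == pairs[i][0]:
--             j += 1
--         kept += max(w for _, w in pairs[i:j])
--         i = j
--     return sum(worths) - kept
-- ===== Notes on version B (the rewrite author's own statement) =====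
-- stated objective: alternative
-- what changed: Replaces A's per-character pass that maintains a stack of run representatives (compare each element with the stack top, push/pop, then sum the surviving stack) by a run-peeling loop over the zipped (char, worth) list: each outer iteration scans forward to the end of the current maximal run of equal characters, adds max() of that run's slice to the kept total, and jumps the index past the run; the result is sum(worths) minus the kept total.
import Mathlib
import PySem

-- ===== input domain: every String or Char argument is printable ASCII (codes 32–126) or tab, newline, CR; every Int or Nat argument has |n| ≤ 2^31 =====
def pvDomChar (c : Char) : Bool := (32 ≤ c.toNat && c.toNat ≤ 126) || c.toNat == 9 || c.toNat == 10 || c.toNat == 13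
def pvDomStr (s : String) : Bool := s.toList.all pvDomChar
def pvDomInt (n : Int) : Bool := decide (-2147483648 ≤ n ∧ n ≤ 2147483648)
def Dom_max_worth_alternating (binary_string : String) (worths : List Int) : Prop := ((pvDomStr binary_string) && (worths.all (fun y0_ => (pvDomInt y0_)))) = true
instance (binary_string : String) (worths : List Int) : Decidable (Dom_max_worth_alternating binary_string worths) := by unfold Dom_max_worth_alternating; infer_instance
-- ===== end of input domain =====

-- B peels whole maximal runs off the zipped list (outer loop per run, max over the run's
-- slice) instead of A's per-character stack pass; objective: alternative decomposition.


-- ===== PORT A =====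
-- the loop body of A; the Python stack is ported with its top as the list HEAD
-- (append = cons, stack[-1] = head, pop = tail); state = (stack, removed_worth).
-- worths[i] is in range for every admitted input (Pre_); getD 0 is exact there.
def pvAStep (chars : List Char) (worths : List Int)
    (st : List (Char × Int) × Int) (i : Nat) : List (Char × Int) × Int :=
  let current_char := chars.getD i ' '
  let current_worth := worths.getD i 0
  match st.1 with
  | [] => ((current_char, current_worth) :: st.1, st.2)
  | (top_char, top_worth) :: rest =>
    if top_char ≠ current_char then ((current_char, current_worth) :: st.1, st.2)
    else if current_worth > top_worth then
      ((current_char, current_worth) :: rest, st.2 + top_worth)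
    else (st.1, st.2 + current_worth)

def max_worth_alternating (binary_string : String) (worths : List Int) : Int :=
  let chars := binary_string.toList
  let n := chars.length
  let res := (List.range n).foldl (pvAStep chars worths) ([], 0)
  let total_worth_stack := (res.1.map Prod.snd).sum
  let total_worth_input := worths.sum
  total_worth_input - total_worth_stack

-- ===== PORT B =====
-- Python's max over a nonempty list of ints (here the list is always nonempty:
-- it is rest[:k] with rest ≠ [] and k ≥ 1)
def pvMax (l : List Int) : Int :=
  match l with
  | [] => 0
  | h :: t => t.foldl max h

-- inner while loop: advance k while rest[k] has the same character c
-- (fuel = rest.length bounds the iteration count; it is never exhausted)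
def pvRunLen : Nat → List (Char × Int) → Char → Nat → Nat
  | 0, _, _, k => k
  | fuel + 1, rest, c, k =>
    if k < rest.length ∧ (rest.getD k (' ', 0)).1 = c then pvRunLen fuel rest c (k + 1) else k

-- outer while loop ('while i < len(pairs):'); pairs[i:j] (0 ≤ i ≤ j) is ported exactly
-- as (pairs.take j).drop i; fuel = pairs.length bounds the iteration count (never exhausted)
def pvBKept : Nat → List (Char × Int) → Nat → Int → Int
  | 0, _, _, kept => kept
  | fuel + 1, pairs, i, kept =>
    if i < pairs.length then
      let j := pvRunLen pairs.length pairs (pairs.getD i (' ', 0)).1 (i + 1)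
      pvBKept fuel pairs j (kept + pvMax (((pairs.take j).drop i).map Prod.snd))
    else kept

def max_worth_alternating_alt (binary_string : String) (worths : List Int) : Int :=
  worths.sum - pvBKept (binary_string.toList.zip worths).length (binary_string.toList.zip worths) 0 0

-- ===== PRECONDITION & SPEC =====
-- A evaluates worths[i] for every i < len(binary_string): it raises IndexError iff
-- worths is shorter than binary_string; exactly those inputs are excluded.
def Pre_max_worth_alternating (binary_string : String) (worths : List Int) : Prop :=
  binary_string.toList.length ≤ worths.length
instance (binary_string : String) (worths : List Int) : Decidable (Pre_max_worth_alternating binary_string worths) := by unfold Pre_max_worth_alternating; infer_instance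

def pvWitness_max_worth_alternating : String × List Int := ("0011", [1, 2, 3, 4])

def Spec_max_worth_alternating (binary_string : String) (worths : List Int) (out : Int) : Prop := out = max_worth_alternating_alt binary_string worths
instance (binary_string : String) (worths : List Int) (out : Int) : Decidable (Spec_max_worth_alternating binary_string worths out) := by unfold Spec_max_worth_alternating; infer_instance

-- ===== CLAIM (what is proved, stated in full; the proofs are below) =====
def Claim_equal_max_worth_alternating : Prop := ∀ (binary_string : String) (worths : List Int), Dom_max_worth_alternating binary_string worths → Pre_max_worth_alternating binary_string worths → Spec_max_worth_alternating binary_string worths (max_worth_alternating binary_string worths)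

-- ===== LEMMAS AND PROOFS =====

-- A's loop body re-expressed on the (char, worth) pair itself (no index lookup)
def pvAStepP (st : List (Char × Int) × Int) (cw : Char × Int) : List (Char × Int) × Int :=
  match st.1 with
  | [] => ((cw.1, cw.2) :: st.1, st.2)
  | (top_char, top_worth) :: rest =>
    if top_char ≠ cw.1 then ((cw.1, cw.2) :: st.1, st.2)
    else if cw.2 > top_worth then ((cw.1, cw.2) :: rest, st.2 + top_worth)
    else (st.1, st.2 + cw.2)

-- proof-side reference: a single O(1)-state pass; state = (kept, prev, run_max)
def pvBStep (st : Int × Option Char × Int) (cw : Char × Int) : Int × Option Char × Int :=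
  if some cw.1 ≠ st.2.1 then (st.1 + cw.2, some cw.1, cw.2)
  else if cw.2 > st.2.2 then (st.1 + cw.2 - st.2.2, st.2.1, cw.2)
  else st

-- A's fold over range n equals the fold of pvAStepP over the zipped prefix
lemma pvA_range_eq_zip (chars : List Char) (worths : List Int)
    (n : Nat) (hn : n ≤ chars.length) (h : chars.length ≤ worths.length)
    (s : List (Char × Int) × Int) :
    (List.range n).foldl (pvAStep chars worths) s
      = ((chars.zip worths).take n).foldl pvAStepP s := by
  induction n generalizing s with
  | zero => simp
  | succ m ih =>
    have hm : m ≤ chars.length := Nat.le_of_succ_le hn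
    have hmc : m < chars.length := hn
    have hmw : m < worths.length := lt_of_lt_of_le hmc h
    have hz : m < (chars.zip worths).length := by
      simp [List.length_zip]; omega
    rw [List.range_succ, List.foldl_append, ih hm]
    have htake : (chars.zip worths).take (m + 1)
        = (chars.zip worths).take m ++ [(chars.zip worths)[m]] := by
      rw [List.take_add_one]
      simp [List.getElem?_eq_getElem hz]
    rw [htake, List.foldl_append]
    simp only [List.foldl_cons, List.foldl_nil]
    have : (chars.zip worths)[m] = (chars[m], worths[m]) := List.getElem_zip
    rw [this]
    simp [pvAStep, pvAStepP, List.getD_eq_getElem?_getD, List.getElem?_eq_getElem hmc,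
      List.getElem?_eq_getElem hmw]

-- invariant linking A's stack to the reference pass's (prev, run_max)
def pvInv (stack : List (Char × Int)) (kept : Int) (prev : Option Char) (run_max : Int) : Prop :=
  (stack.map Prod.snd).sum = kept ∧
  match stack, prev with
  | [], none => True
  | (tc, tw) :: _, some pc => tc = pc ∧ tw = run_max
  | _, _ => False

lemma pvInv_step (l : List (Char × Int)) :
    ∀ (stack : List (Char × Int)) (rem kept : Int) (prev : Option Char) (run_max : Int),
    pvInv stack kept prev run_max →
    ((l.foldl pvAStepP (stack, rem)).1.map Prod.snd).sum
      = (l.foldl pvBStep (kept, prev, run_max)).1 := by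
  induction l with
  | nil => intro stack rem kept prev run_max h; exact h.1
  | cons cw rest ih =>
    intro stack rem kept prev run_max h
    obtain ⟨hsum, hmatch⟩ := h
    simp only [List.foldl_cons]
    match stack, prev with
    | [], none =>
      simp only [List.map_nil, List.sum_nil] at hsum
      rw [show pvAStepP ([], rem) cw = ([(cw.1, cw.2)], rem) from rfl,
          show pvBStep (kept, none, run_max) cw = (kept + cw.2, some cw.1, cw.2) from by
            simp [pvBStep]]
      exact ih _ _ _ _ _ ⟨by simp; omega, rfl, rfl⟩
    | (tc, tw) :: srest, some pc =>
      obtain ⟨hc, hw⟩ := hmatch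
      rw [← hc, ← hw]
      by_cases hne : tc = cw.1
      · by_cases hgt : cw.2 > tw
        · rw [show pvAStepP ((tc, tw) :: srest, rem) cw = ((cw.1, cw.2) :: srest, rem + tw) from by
                simp [pvAStepP, hne, hgt],
              show pvBStep (kept, some tc, tw) cw = (kept + cw.2 - tw, some tc, cw.2) from by
                simp [pvBStep, hne, hgt]]
          exact ih _ _ _ _ _ ⟨by simp at hsum ⊢; omega, hne.symm, rfl⟩
        · rw [show pvAStepP ((tc, tw) :: srest, rem) cw = ((cw.1, tw) :: srest, rem + cw.2) from by
                simp [pvAStepP, hne, hgt],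
              show pvBStep (kept, some tc, tw) cw = (kept, some tc, tw) from by
                simp [pvBStep, hne, hgt]]
          exact ih _ _ _ _ _ ⟨hsum, hne.symm, rfl⟩
      · have hne' : cw.1 ≠ tc := fun hx => hne hx.symm
        rw [show pvAStepP ((tc, tw) :: srest, rem) cw = ((cw.1, cw.2) :: (tc, tw) :: srest, rem) from by
              simp [pvAStepP, hne],
            show pvBStep (kept, some tc, tw) cw = (kept + cw.2, some cw.1, cw.2) from by
              simp [pvBStep, hne']]
        exact ih _ _ _ _ _ ⟨by simp at hsum ⊢; omega, rfl, rfl⟩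

-- folding the reference pass over a run of equal characters accumulates the running max
lemma pvRun_fold (c : Char) (l : List (Char × Int)) (hc : ∀ p ∈ l, p.1 = c) :
    ∀ (k m : Int),
    l.foldl pvBStep (k, some c, m)
      = (k + (l.map Prod.snd).foldl max m - m, some c, (l.map Prod.snd).foldl max m) := by
  induction l with
  | nil => intro k m; simp
  | cons p t ih =>
    intro k m
    have hp : p.1 = c := hc p (List.mem_cons_self ..)
    have ht : ∀ q ∈ t, q.1 = c := fun q hq => hc q (List.mem_cons_of_mem _ hq)
    simp only [List.foldl_cons, List.map_cons]
    by_cases hgt : p.2 > m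
    · rw [show pvBStep (k, some c, m) p = (k + p.2 - m, some c, p.2) from by
            simp [pvBStep, hp, hgt]]
      rw [ih ht]
      have hmax : max m p.2 = p.2 := max_eq_right (le_of_lt hgt)
      rw [hmax]
      simp only [Prod.mk.injEq, and_true]
      omega
    · rw [show pvBStep (k, some c, m) p = (k, some c, m) from by
            simp [pvBStep, hp, hgt]]
      rw [ih ht]
      have hmax : max m p.2 = m := max_eq_left (by omega)
      simp [hmax]

-- with enough fuel, pvRunLen counts k plus the length of the same-character prefix after k
lemma pvRunLen_eq (fuel : Nat) (rest : List (Char × Int)) (c : Char) (k : Nat)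
    (hf : rest.length ≤ k + fuel) :
    pvRunLen fuel rest c k = k + ((rest.drop k).takeWhile (fun p => p.1 == c)).length := by
  induction fuel generalizing k with
  | zero =>
    rw [List.drop_eq_nil_of_le (by omega)]
    simp [pvRunLen]
  | succ fuel ih =>
    rw [pvRunLen]
    split
    · rename_i h
      obtain ⟨hk, hck⟩ := h
      have hdrop : rest.drop k = rest[k] :: rest.drop (k + 1) := List.drop_eq_getElem_cons hk
      have hget : rest.getD k (' ', 0) = rest[k] := by
        simp [List.getD_eq_getElem?_getD, List.getElem?_eq_getElem hk]
      rw [ih (k + 1) (by omega), hdrop, List.takeWhile_cons]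
      have : (rest[k].1 == c) = true := by rw [← hget]; exact beq_iff_eq.mpr hck
      simp [this]; omega
    · rename_i h
      by_cases hk : k < rest.length
      · have hck : (rest.getD k (' ', 0)).1 ≠ c := fun hc' => h ⟨hk, hc'⟩
        have hdrop : rest.drop k = rest[k] :: rest.drop (k + 1) := List.drop_eq_getElem_cons hk
        have hget : rest.getD k (' ', 0) = rest[k] := by
          simp [List.getD_eq_getElem?_getD, List.getElem?_eq_getElem hk]
        rw [hdrop, List.takeWhile_cons]
        have : (rest[k].1 == c) = false := by
          rw [← hget]; exact beq_eq_false_iff_ne.mpr hck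
        simp [this]
      · rw [List.drop_eq_nil_of_le (by omega)]; simp

-- the first element of dropWhile (char = c) does not have character c
lemma pvBoundary (c : Char) (t : List (Char × Int)) :
    ∀ q, (t.dropWhile (fun p => p.1 == c)).head? = some q → some q.1 ≠ some c := by
  induction t with
  | nil => intro q hq; simp at hq
  | cons p t ih =>
    intro q hq
    by_cases h : (p.1 == c) = true
    · rw [List.dropWhile_cons, if_pos h] at hq
      exact ih q hq
    · rw [List.dropWhile_cons, if_neg h] at hq
      simp only [List.head?_cons, Option.some.injEq] at hq
      subst hq
      simp at h
      simp [h]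

-- the reference single pass over the suffix from index i equals B's run-peeling loop
lemma pvB_fold_eq_kept (fuel : Nat) :
    ∀ (pairs : List (Char × Int)) (i : Nat), pairs.length ≤ i + fuel →
    ∀ (kept : Int) (prev : Option Char) (m : Int),
    (∀ p, (pairs.drop i).head? = some p → some p.1 ≠ prev) →
    ((pairs.drop i).foldl pvBStep (kept, prev, m)).1 = pvBKept fuel pairs i kept := by
  induction fuel with
  | zero =>
    intro pairs i hlen kept prev m _
    rw [List.drop_eq_nil_of_le (by omega)]
    simp [pvBKept]
  | succ fuel ih =>
    intro pairs i hlen kept prev m hb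
    by_cases hi : i < pairs.length
    case neg =>
      rw [List.drop_eq_nil_of_le (by omega)]
      simp [pvBKept, hi]
    case pos =>
      obtain ⟨c, w, hcw⟩ : ∃ c w, pairs[i] = (c, w) := ⟨pairs[i].1, pairs[i].2, rfl⟩
      obtain ⟨t, ht⟩ : ∃ x, x = pairs.drop (i + 1) := ⟨_, rfl⟩
      have hdropi : pairs.drop i = (c, w) :: t := by
        rw [List.drop_eq_getElem_cons hi, hcw, ht]
      have hb' : some c ≠ prev := hb (c, w) (by rw [hdropi]; rfl)
      obtain ⟨t₁, ht₁⟩ : ∃ x, x = t.takeWhile (fun p => p.1 == c) := ⟨_, rfl⟩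
      obtain ⟨t₂, ht₂⟩ : ∃ x, x = t.dropWhile (fun p => p.1 == c) := ⟨_, rfl⟩
      have hsplit : t = t₁ ++ t₂ := by
        rw [ht₁, ht₂]; exact (List.takeWhile_append_dropWhile).symm
      have hc1 : ∀ p ∈ t₁, p.1 = c := by
        intro p hp
        rw [ht₁] at hp
        have h4 := List.mem_takeWhile_imp hp
        exact beq_iff_eq.mp h4
      obtain ⟨M, hM⟩ : ∃ x, x = (t₁.map Prod.snd).foldl max w := ⟨_, rfl⟩
      have lhs1 : pvBStep (kept, prev, m) (c, w) = (kept + w, some c, w) := by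
        simp [pvBStep, hb']
      -- the value of j computed by the inner while loop
      have hgetc : (pairs.getD i (' ', 0)).1 = c := by
        simp [List.getD_eq_getElem?_getD, List.getElem?_eq_getElem hi, hcw]
      have hj : pvRunLen pairs.length pairs (pairs.getD i (' ', 0)).1 (i + 1)
          = i + 1 + t₁.length := by
        rw [hgetc, pvRunLen_eq _ _ _ _ (by omega), ← ht, ← ht₁]
      -- the two list manipulations of one outer iteration
      have htake1 : t.take t₁.length = t₁ := by
        conv_lhs => rw [hsplit]
        rw [List.take_append_of_le_length (le_refl _), List.take_length]
      have hdrop1 : t.drop t₁.length = t₂ := by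
        conv_lhs => rw [hsplit]
        rw [List.drop_append_of_le_length (le_refl _), List.drop_length]
        simp
      have hslice : ((pairs.take (i + 1 + t₁.length)).drop i) = (c, w) :: t₁ := by
        rw [List.drop_take, List.drop_eq_getElem_cons hi, hcw, ← ht,
          show i + 1 + t₁.length - i = t₁.length + 1 from by omega,
          List.take_succ_cons, htake1]
      have hdropj : pairs.drop (i + 1 + t₁.length) = t₂ := by
        rw [← List.drop_drop, ← ht, hdrop1]
      -- LHS: fold over the run, then over the rest
      have lhs2 : ((pairs.drop i).foldl pvBStep (kept, prev, m))
          = (t₂.foldl pvBStep (kept + M, some c, M)) := by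
        rw [hdropi]
        simp only [List.foldl_cons, lhs1]
        conv_lhs => rw [hsplit]
        rw [List.foldl_append, pvRun_fold c t₁ hc1, ← hM,
          show kept + w + M - w = kept + M from by omega]
      -- RHS: one unfolding of the outer loop
      have rhs : pvBKept (fuel + 1) pairs i kept
          = pvBKept fuel pairs (i + 1 + t₁.length) (kept + M) := by
        simp only [pvBKept, if_pos hi, hj, hslice]
        congr 1
        simp only [pvMax, List.map_cons]
        rw [← hM]
      have hb2 : ∀ p, (pairs.drop (i + 1 + t₁.length)).head? = some p → some p.1 ≠ some c := by
        intro q hq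
        rw [hdropj, ht₂] at hq
        exact pvBoundary c t q hq
      rw [lhs2, rhs, ← hdropj]
      exact ih pairs (i + 1 + t₁.length) (by omega) (kept + M) (some c) M hb2

lemma pvAB_eq (binary_string : String) (worths : List Int)
    (h : binary_string.toList.length ≤ worths.length) :
    max_worth_alternating binary_string worths
      = max_worth_alternating_alt binary_string worths := by
  unfold max_worth_alternating max_worth_alternating_alt
  simp only []
  have h1 := pvA_range_eq_zip binary_string.toList worths binary_string.toList.length
    (le_refl _) h (([] : List (Char × Int)), (0 : Int))
  have htake : (binary_string.toList.zip worths).take binary_string.toList.length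
      = binary_string.toList.zip worths := by
    apply List.take_of_length_le
    simp [List.length_zip]
  rw [htake] at h1
  rw [h1]
  have h2 := pvInv_step (binary_string.toList.zip worths) [] 0 0 none 0
    ⟨by simp, by trivial⟩
  rw [h2]
  have h3 := pvB_fold_eq_kept (binary_string.toList.zip worths).length
    (binary_string.toList.zip worths) 0 (by omega) 0 none 0
    (fun p _ => by simp)
  rw [List.drop_zero] at h3
  rw [h3]

-- ===== VERDICT (by name: the statement is the Claim_ definition above) =====
theorem max_worth_alternating_spec : Claim_equal_max_worth_alternating := by
  intro binary_string worths _ hpre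
  unfold Spec_max_worth_alternating
  exact pvAB_eq binary_string worths hpre
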